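-- pv_equiv track=rewrite | github.com/cxygiao/DQC | algorithm/DQC_genetic.py | list_to_dag_list
-- ===== SOURCE A (Python) =====
-- import copy
--
-- def list_to_dag_list(gate_list):
--     dag_list = copy.deepcopy(gate_list)
--     dag_list[0].append('-1')  # 前驱-1即无前驱
--     for i in range(1, len(gate_list)):
--         j = i - 1
--         if len(list(set(gate_list[i]) & set(gate_list[j]))) > 0:  # 两个集合有交集，则表示有前驱后驱关系，即dag图上有箭头
--             dag_list[i].append(str(j))
--         if len(list(set(gate_list[i]) & set(gate_list[j]))) == 0:  # 两集合无交集，没有依赖关系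
--             dag_list[i].append('-1')
--             while j >= 0:
--                 if len(list(set(gate_list[i]) & set(gate_list[j - 1]))) == 0:
--                     j -= 1
--                     continue
--                 if len(list(set(gate_list[i]) & set(gate_list[j - 1]))) > 0:
--                     dag_list[i][-1] = str(j - 1)
--                     break
--     return dag_list
-- ===== SOURCE B (Python) =====
-- def list_to_dag_list(gate_list):
--     # One pass: last[q] = index of the most recent earlier gate containing q;
--     # predecessor of gate i = max of last[q] over its elements (-1 if none).
--     last = {}
--     out = []
--     for i, gate in enumerate(gate_list):
--         pred = max((last.get(q, -1) for q in gate), default=-1)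
--         out.append(list(gate) + [str(pred)])
--         for q in gate:
--             last[q] = i
--     return out
-- ===== Notes on version B (the rewrite author's own statement) =====
-- stated objective: faster
-- what changed: Replaces A's per-gate backward scan over all earlier gates (with repeated set intersections) by a single forward pass that keeps a dict mapping each qubit label to its last occurrence index; the predecessor is the max of those indices over the gate's elements.
import Mathlib
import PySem

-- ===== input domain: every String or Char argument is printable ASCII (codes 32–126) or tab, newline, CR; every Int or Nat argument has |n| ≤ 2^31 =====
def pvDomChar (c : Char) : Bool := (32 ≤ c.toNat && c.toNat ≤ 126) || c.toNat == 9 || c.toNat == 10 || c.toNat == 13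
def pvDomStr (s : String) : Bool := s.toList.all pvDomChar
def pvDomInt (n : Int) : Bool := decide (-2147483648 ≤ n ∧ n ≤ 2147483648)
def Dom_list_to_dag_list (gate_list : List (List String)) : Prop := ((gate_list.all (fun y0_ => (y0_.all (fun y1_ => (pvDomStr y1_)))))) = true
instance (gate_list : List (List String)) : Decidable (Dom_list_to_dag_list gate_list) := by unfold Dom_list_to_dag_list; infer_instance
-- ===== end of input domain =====

-- B replaces A's per-gate backward scan by a single forward pass keeping, per qubit
-- label, the index of the last gate that used it; A mutates nothing observable (it
-- deep-copies its argument), so return-value equivalence is the whole story.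

-- ===== PORT A =====

-- len(list(set(a) & set(b))) > 0, i.e. the two gates share an element
def hasInter (a b : List String) : Bool := a.any (fun x => b.contains x)

-- the 'while j >= 0' loop of A, fuel n = j + 1 (j counts down; gate_list[j-1] may be
-- the Python negative index -1, ported exactly with pyGet?; the .getD [] is unreachable
-- filler since A raises earlier (via Pre_) only on the empty list)
def whileJ (gs : List (List String)) (gi : List String) : Nat → String
  | 0 => "-1"
  | (n+1) =>
      if hasInter gi ((PySem.List.pyGet? gs ((n : Int) - 1)).getD []) then
        PySem.Int.toStr ((n : Int) - 1)
      else whileJ gs gi n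

-- A appends one predecessor string to each row: row 0 gets '-1'; row i ≥ 1 gets
-- str(i-1) if it intersects row i-1, else the result of the while loop (started '-1').
def list_to_dag_list (gate_list : List (List String)) : List (List String) :=
  gate_list.zipIdx.map (fun p =>
    if p.2 = 0 then p.1 ++ ["-1"]
    else if hasInter p.1 ((PySem.List.pyGet? gate_list ((p.2 : Int) - 1)).getD []) then
      p.1 ++ [PySem.Int.toStr ((p.2 : Int) - 1)]
    else p.1 ++ [whileJ gate_list p.1 p.2])

-- ===== PORT B =====

-- B's loop: i is the current index, last maps each element to the index of the last
-- earlier gate containing it; Python's max(…, default=-1) is the fold from -1 (every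
-- stored index is ≥ 0, so folding from -1 equals max-with-default).
def bLoop (i : Int) (last : PySem.Dict String Int) : List (List String) → List (List String)
  | [] => []
  | g :: rest =>
      let pred := g.foldl (fun m q => max m (last.getD q (-1))) (-1)
      (g ++ [PySem.Int.toStr pred]) ::
        bLoop (i + 1) (g.foldl (fun d q => d.insert q i) last) rest

def list_to_dag_list_alt (gate_list : List (List String)) : List (List String) :=
  bLoop 0 PySem.Dict.empty gate_list

-- ===== PRECONDITION & SPEC =====
-- Pre_ excludes only the empty list, on which A raises IndexError (dag_list[0]).
def Pre_list_to_dag_list (gate_list : List (List String)) : Prop := gate_list ≠ []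
instance (gate_list : List (List String)) : Decidable (Pre_list_to_dag_list gate_list) := by unfold Pre_list_to_dag_list; infer_instance
def pvWitness_list_to_dag_list : List (List String) := [["a"], ["b"], ["a", "b"]]

def Spec_list_to_dag_list (gate_list : List (List String)) (out : List (List String)) : Prop := out = list_to_dag_list_alt gate_list
instance (gate_list : List (List String)) (out : List (List String)) : Decidable (Spec_list_to_dag_list gate_list out) := by unfold Spec_list_to_dag_list; infer_instance

-- ===== CLAIM (what is proved, stated in full; the proofs are below) =====
def Claim_equal_list_to_dag_list : Prop := ∀ (gate_list : List (List String)), Dom_list_to_dag_list gate_list → Pre_list_to_dag_list gate_list → Spec_list_to_dag_list gate_list (list_to_dag_list gate_list)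

-- ===== LEMMAS AND PROOFS =====

-- reference value: largest k < i such that gate g intersects gs[k], else -1
def maxInter (gs : List (List String)) (g : List String) : Nat → Int
  | 0 => -1
  | (k+1) => if hasInter g (gs.getD k []) then (k : Int) else maxInter gs g k

-- largest k < i such that q ∈ gs[k], else -1
def lastOcc (gs : List (List String)) (q : String) : Nat → Int
  | 0 => -1
  | (k+1) => if q ∈ gs.getD k [] then (k : Int) else lastOcc gs q k

def refRow (gs : List (List String)) (p : List String × Nat) : List String :=
  p.1 ++ [PySem.Int.toStr (maxInter gs p.1 p.2)]

lemma hasInter_iff (a b : List String) : hasInter a b = true ↔ ∃ x ∈ a, x ∈ b := by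
  simp [hasInter]

lemma lastOcc_bounds (gs : List (List String)) (q : String) (i : Nat) :
    -1 ≤ lastOcc gs q i ∧ lastOcc gs q i ≤ (i : Int) - 1 := by
  induction i with
  | zero => simp [lastOcc]
  | succ k ih =>
      unfold lastOcc
      split_ifs with h
      · omega
      · push_cast; omega

-- A's while loop computes the reference search (fuel m+1 starts at j = m)
lemma whileJ_eq (gs : List (List String)) (g : List String) :
    ∀ m, m ≤ gs.length → whileJ gs g (m + 1) = PySem.Int.toStr (maxInter gs g m) := by
  intro m
  induction m with
  | zero =>
      intro _
      have hM : maxInter gs g 0 = -1 := by simp [maxInter]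
      show (if hasInter g ((PySem.List.pyGet? gs ((0 : Int) - 1)).getD []) then
          PySem.Int.toStr ((0 : Int) - 1) else whileJ gs g 0) = _
      rw [hM]
      split_ifs
      · decide
      · show ("-1" : String) = _
        decide
  | succ k ih =>
      intro hle
      have hk : k < gs.length := by omega
      have hidx : ((k + 1 : Nat) : Int) - 1 = ((k : Nat) : Int) := by push_cast; ring
      show (if hasInter g ((PySem.List.pyGet? gs (((k+1 : Nat) : Int) - 1)).getD []) then
          PySem.Int.toStr (((k+1 : Nat) : Int) - 1) else whileJ gs g (k + 1)) = _
      rw [hidx, PySem.List.pyGet?_natCast]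
      have hget : (gs[k]?).getD [] = gs.getD k [] := by
        simp [List.getD, List.getElem?_eq_getElem hk]
      rw [hget, ih (by omega)]
      simp only [maxInter]
      split_ifs <;> rfl

-- A equals the reference row map
lemma portA_eq_ref (gs : List (List String)) :
    list_to_dag_list gs = gs.zipIdx.map (refRow gs) := by
  unfold list_to_dag_list
  apply List.map_congr_left
  intro p hp
  have hlen : p.2 < gs.length := by have := (List.mem_zipIdx hp).2.1; omega
  rcases p with ⟨g, i⟩
  cases i with
  | zero =>
      show g ++ ["-1"] = refRow gs (g, 0)
      have hM : maxInter gs g 0 = -1 := by simp [maxInter]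
      simp only [refRow, hM]
      congr 1
  | succ k =>
      simp only [refRow]
      have hk : k < gs.length := by simpa using Nat.lt_of_succ_lt (by simpa using hlen)
      have hidx : ((k + 1 : Nat) : Int) - 1 = ((k : Nat) : Int) := by push_cast; ring
      have hget : ((PySem.List.pyGet? gs (((k+1 : Nat) : Int) - 1)).getD []) = gs.getD k [] := by
        rw [hidx, PySem.List.pyGet?_natCast]
        simp [List.getD, List.getElem?_eq_getElem hk]
      rw [if_neg (Nat.succ_ne_zero k), hget]
      by_cases h : hasInter g (gs.getD k []) = true
      · rw [if_pos h]
        simp only [maxInter]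
        rw [if_pos h, hidx]
      · rw [if_neg h, whileJ_eq gs g k (by omega)]
        simp only [maxInter]
        rw [if_neg h]

-- generic upper bound for a running max
lemma fold_max_le {α : Type} (g : List α) (f : α → Int) (c : Int) :
    ∀ a, a ≤ c → (∀ q ∈ g, f q ≤ c) →
      g.foldl (fun m q => max m (f q)) a ≤ c := by
  induction g with
  | nil => intro a ha _; simpa using ha
  | cons q rest ih =>
      intro a ha hall
      simp only [List.foldl_cons]
      exact ih _ (by
        have := hall q (by simp)
        exact max_le ha this) (fun q' hq' => hall q' (by simp [hq']))

-- the running max of last occurrences equals the backward intersection search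
lemma fold_lastOcc_eq_maxInter (gs : List (List String)) (g : List String) (i : Nat) :
    g.foldl (fun m q => max m (lastOcc gs q i)) (-1) = maxInter gs g i := by
  induction i with
  | zero =>
      unfold maxInter
      have : ∀ (l : List String) (a : Int), -1 ≤ a →
          l.foldl (fun m q => max m (lastOcc gs q 0)) a = a := by
        intro l
        induction l with
        | nil => intro a _; rfl
        | cons q rest ih =>
            intro a ha
            simp only [List.foldl_cons, lastOcc]
            rw [max_eq_left ha]
            exact ih a ha
      exact this g (-1) le_rfl
  | succ k ih =>
      unfold maxInter
      by_cases h : hasInter g (gs.getD k []) = true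
      · rw [if_pos h]
        obtain ⟨q, hqg, hqk⟩ := (hasInter_iff _ _).1 h
        have hlow : lastOcc gs q (k + 1) ≤
            g.foldl (fun m q => max m (lastOcc gs q (k+1))) (-1) :=
          (PySem.List.le_foldl_max_int g (fun q => lastOcc gs q (k+1)) (-1)).2 q hqg
        have hqval : lastOcc gs q (k + 1) = (k : Int) := by
          unfold lastOcc; rw [if_pos hqk]
        have hhigh : g.foldl (fun m q => max m (lastOcc gs q (k+1))) (-1) ≤ (k : Int) := by
          apply fold_max_le
          · omega
          · intro q' _
            have := (lastOcc_bounds gs q' (k+1)).2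
            push_cast at this ⊢; omega
        omega
      · rw [if_neg h]
        rw [← ih]
        apply PySem.List.foldl_congr_mem
        intro acc q hq
        have hqk : q ∉ gs.getD k [] := by
          intro hmem
          exact h ((hasInter_iff _ _).2 ⟨q, hq, hmem⟩)
        simp only [lastOcc]
        rw [if_neg hqk]

-- inserting index i for every element of g updates the last-occurrence table
lemma fold_insert_getD (g : List String) (i : Int) :
    ∀ (D : PySem.Dict String Int) (q : String),
      (g.foldl (fun d q' => d.insert q' i) D).getD q (-1) =
        if q ∈ g then i else D.getD q (-1) := by
  induction g with
  | nil => intro D q; simp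
  | cons q0 rest ih =>
      intro D q
      simp only [List.foldl_cons]
      rw [ih]
      by_cases hq : q ∈ rest
      · simp [hq]
      · by_cases h0 : q = q0
        · simp [h0, PySem.Dict.getD_insert]
        · simp [hq, h0, PySem.Dict.getD_insert]


lemma getD_append_length (pre : List (List String)) (g : List String) (t : List (List String)) :
    (pre ++ g :: t).getD pre.length [] = g := by
  induction pre with
  | nil => rfl
  | cons x xs ih => simp [ih]


-- B's loop, run from any correct last-occurrence table, produces the reference rows
lemma bLoop_eq_ref (gs : List (List String)) :
    ∀ (rest pre : List (List String)) (D : PySem.Dict String Int),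
      gs = pre ++ rest →
      (∀ q, D.getD q (-1) = lastOcc gs q pre.length) →
      bLoop (pre.length : Int) D rest = (rest.zipIdx pre.length).map (refRow gs) := by
  intro rest
  induction rest with
  | nil => intro pre D _ _; rfl
  | cons g t ih =>
      intro pre D hsplit hD
      rw [List.zipIdx_cons]
      simp only [bLoop, List.map_cons]
      congr 1
      · -- the produced row
        simp only [refRow]
        congr 1
        have : g.foldl (fun m q => max m (D.getD q (-1))) (-1) =
            g.foldl (fun m q => max m (lastOcc gs q pre.length)) (-1) := by
          apply PySem.List.foldl_congr_mem
          intro acc q _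
          rw [hD q]
        rw [this, fold_lastOcc_eq_maxInter]
      · -- the rest of the loop via the IH at pre ++ [g]
        have hsplit' : gs = (pre ++ [g]) ++ t := by simpa using hsplit
        have hlen : (pre ++ [g]).length = pre.length + 1 := by simp
        have hD' : ∀ q, (g.foldl (fun d q' => d.insert q' (pre.length : Int)) D).getD q (-1) =
            lastOcc gs q (pre.length + 1) := by
          intro q
          rw [fold_insert_getD]
          have hget : gs.getD pre.length [] = g := by
            rw [hsplit]; exact getD_append_length pre g t
          unfold lastOcc
          rw [hget, hD q]
        have := ih (pre ++ [g]) (g.foldl (fun d q' => d.insert q' (pre.length : Int)) D)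
          hsplit' (by rw [hlen]; exact hD')
        rw [hlen] at this
        push_cast at this ⊢
        exact this

lemma portB_eq_ref (gs : List (List String)) :
    list_to_dag_list_alt gs = gs.zipIdx.map (refRow gs) := by
  have := bLoop_eq_ref gs gs [] PySem.Dict.empty (by simp) (by intro q; simp [lastOcc])
  simpa [list_to_dag_list_alt] using this

-- ===== VERDICT (by name: the statement is the Claim_ definition above) =====
theorem list_to_dag_list_spec : Claim_equal_list_to_dag_list := by
  intro gs _ _
  unfold Spec_list_to_dag_list
  rw [portA_eq_ref, portB_eq_ref]
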